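-- pv_equiv track=rewrite | github.com/DaveUgalde/AnalyzerBrain | src/agents/architect_agent.py | _identify_communication_patterns
-- ===== SOURCE A (Python) =====
-- from typing import Dict, List, Optional, Any
--
-- def _identify_communication_patterns(components: List) -> List[str]:
--     """Identify communication patterns."""
--     patterns = []
--
--     # Check for synchronous communication
--     if any("api_call" in str(comp).lower() or "http" in str(comp).lower() for comp in components):
--         patterns.append("synchronous_rpc")
--
--     # Check for asynchronous communication
--     if any("queue" in str(comp).lower() or "event" in str(comp).lower() for comp in components):
--         patterns.append("asynchronous_messaging")
--
--     # Check for database sharing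
--     if any("shared_database" in str(comp).lower() for comp in components):
--         patterns.append("shared_database")
--
--     return patterns if patterns else ["direct_calls"]
-- ===== SOURCE B (Python) =====
-- def _identify_communication_patterns(components):
--     """Identify communication patterns (single pass with flags)."""
--     sync = asyn = shared = False
--     for comp in components:
--         low = str(comp).lower()
--         if "api_call" in low or "http" in low:
--             sync = True
--         if "queue" in low or "event" in low:
--             asyn = True
--         if "shared_database" in low:
--             shared = True
--     patterns = []
--     if sync:
--         patterns.append("synchronous_rpc")
--     if asyn:
--         patterns.append("asynchronous_messaging")
--     if shared:
--         patterns.append("shared_database")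
--     return patterns if patterns else ["direct_calls"]
-- ===== Notes on version B (the rewrite author's own statement) =====
-- stated objective: faster
-- what changed: Replaces three separate any()-scans over the component list (each stringifying and lowercasing every component again) by one single pass that lowercases each component once and accumulates three boolean flags, then emits the patterns in the fixed order.
import Mathlib
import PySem

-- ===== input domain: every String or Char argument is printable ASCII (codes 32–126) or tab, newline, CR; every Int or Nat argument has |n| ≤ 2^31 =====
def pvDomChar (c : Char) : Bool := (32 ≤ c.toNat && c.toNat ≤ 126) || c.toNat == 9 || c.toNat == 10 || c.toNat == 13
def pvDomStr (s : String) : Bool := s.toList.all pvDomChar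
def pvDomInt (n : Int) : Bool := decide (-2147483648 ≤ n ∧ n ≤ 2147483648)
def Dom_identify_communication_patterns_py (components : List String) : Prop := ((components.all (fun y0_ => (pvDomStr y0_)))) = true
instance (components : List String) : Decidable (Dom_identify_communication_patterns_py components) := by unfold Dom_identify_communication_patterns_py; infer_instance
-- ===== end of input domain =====

-- B folds the three any()-scans of A into one single pass that lowercases each component once and accumulates three boolean flags (alternative decomposition, same result).


-- ===== PORT A =====
def identify_communication_patterns_py (components : List String) : List String :=
  let patterns : List String := []
  let patterns := if components.any (fun comp =>
      PySem.Str.isIn "api_call" (PySem.Str.lower comp) || PySem.Str.isIn "http" (PySem.Str.lower comp))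
    then patterns ++ ["synchronous_rpc"] else patterns
  let patterns := if components.any (fun comp =>
      PySem.Str.isIn "queue" (PySem.Str.lower comp) || PySem.Str.isIn "event" (PySem.Str.lower comp))
    then patterns ++ ["asynchronous_messaging"] else patterns
  let patterns := if components.any (fun comp =>
      PySem.Str.isIn "shared_database" (PySem.Str.lower comp))
    then patterns ++ ["shared_database"] else patterns
  if patterns = [] then ["direct_calls"] else patterns

-- ===== PORT B =====
def identify_communication_patterns_py_alt (components : List String) : List String :=
  let flags := components.foldl (fun (fl : Bool × Bool × Bool) comp =>
      let low := PySem.Str.lower comp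
      (fl.1 || (PySem.Str.isIn "api_call" low || PySem.Str.isIn "http" low),
       fl.2.1 || (PySem.Str.isIn "queue" low || PySem.Str.isIn "event" low),
       fl.2.2 || PySem.Str.isIn "shared_database" low)) (false, false, false)
  let patterns : List String :=
    (if flags.1 then ["synchronous_rpc"] else []) ++
    (if flags.2.1 then ["asynchronous_messaging"] else []) ++
    (if flags.2.2 then ["shared_database"] else [])
  if patterns = [] then ["direct_calls"] else patterns

-- ===== PRECONDITION & SPEC =====
def Spec_identify_communication_patterns_py (components : List String) (out : List String) : Prop := out = identify_communication_patterns_py_alt components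
instance (components : List String) (out : List String) : Decidable (Spec_identify_communication_patterns_py components out) := by unfold Spec_identify_communication_patterns_py; infer_instance

-- ===== CLAIM (what is proved, stated in full; the proofs are below) =====
def Claim_equal_identify_communication_patterns_py : Prop := ∀ (components : List String), Dom_identify_communication_patterns_py components → Spec_identify_communication_patterns_py components (identify_communication_patterns_py components)

-- ===== LEMMAS AND PROOFS =====
theorem pv_fold_flags (l : List String) (b1 b2 b3 : Bool) :
    l.foldl (fun (fl : Bool × Bool × Bool) comp =>
      let low := PySem.Str.lower comp
      (fl.1 || (PySem.Str.isIn "api_call" low || PySem.Str.isIn "http" low),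
       fl.2.1 || (PySem.Str.isIn "queue" low || PySem.Str.isIn "event" low),
       fl.2.2 || PySem.Str.isIn "shared_database" low)) (b1, b2, b3)
    = (b1 || l.any (fun comp => PySem.Str.isIn "api_call" (PySem.Str.lower comp) || PySem.Str.isIn "http" (PySem.Str.lower comp)),
       b2 || l.any (fun comp => PySem.Str.isIn "queue" (PySem.Str.lower comp) || PySem.Str.isIn "event" (PySem.Str.lower comp)),
       b3 || l.any (fun comp => PySem.Str.isIn "shared_database" (PySem.Str.lower comp))) := by
  induction l generalizing b1 b2 b3 with
  | nil => simp
  | cons x xs ih =>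
    simp only [List.foldl_cons]
    rw [ih]
    simp [Bool.or_assoc]

-- ===== VERDICT (by name: the statement is the Claim_ definition above) =====
theorem identify_communication_patterns_py_spec : Claim_equal_identify_communication_patterns_py := by
  intro components _
  unfold Spec_identify_communication_patterns_py identify_communication_patterns_py identify_communication_patterns_py_alt
  rw [pv_fold_flags]
  cases h1 : components.any (fun comp => PySem.Str.isIn "api_call" (PySem.Str.lower comp) || PySem.Str.isIn "http" (PySem.Str.lower comp)) <;>
  cases h2 : components.any (fun comp => PySem.Str.isIn "queue" (PySem.Str.lower comp) || PySem.Str.isIn "event" (PySem.Str.lower comp)) <;>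
  cases h3 : components.any (fun comp => PySem.Str.isIn "shared_database" (PySem.Str.lower comp)) <;>
  simp
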